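-- pv_equiv track=rewrite | github.com/T3chfalcon/CloakShell | cloakshield.py | _split_script
-- ===== SOURCE A (Python) =====
-- def _split_script(script_text):
--     """Split script into sections for obfuscation."""
--     sections = []
--     current_section = []
--     in_function = False
--     brace_count = 0
--
--     for line in script_text.split('\n'):
--         # Check for function start
--         if line.strip().startswith('function '):
--             if current_section:
--                 sections.append(('\n'.join(current_section), in_function))
--             current_section = [line]
--             in_function = True
--             brace_count = 0
--         # Count braces to properly handle nested blocks
--         elif in_function:
--             brace_count += line.count('{')
--             brace_count -= line.count('}')
--             current_section.append(line)
--             # Only end function when we've matched all braces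
--             if brace_count == 0 and line.strip() == '}':
--                 sections.append(('\n'.join(current_section), in_function))
--                 current_section = []
--                 in_function = False
--         else:
--             current_section.append(line)
--
--     if current_section:
--         sections.append(('\n'.join(current_section), in_function))
--
--     return sections
-- ===== SOURCE B (Python) =====
-- def _split_script(script_text):
--     """Split script into sections using nested consuming loops over a line index."""
--     lines = script_text.split('\n')
--     n = len(lines)
--     sections = []
--     i = 0
--     while i < n:
--         line = lines[i]
--         if line.strip().startswith('function '):
--             block = [line]
--             i += 1
--             brace = 0
--             while i < n:
--                 cur = lines[i]
--                 if cur.strip().startswith('function '):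
--                     break
--                 brace += cur.count('{') - cur.count('}')
--                 block.append(cur)
--                 i += 1
--                 if brace == 0 and cur.strip() == '}':
--                     break
--             sections.append(('\n'.join(block), True))
--         else:
--             block = [line]
--             i += 1
--             while i < n and not lines[i].strip().startswith('function '):
--                 block.append(lines[i])
--                 i += 1
--             sections.append(('\n'.join(block), False))
--     return sections
-- ===== Notes on version B (the rewrite author's own statement) =====
-- stated objective: alternative
-- what changed: Replaced A's single scan that carries in_function/brace_count state across iterations with an outer index-style loop that, at each section boundary, runs one of two inner consuming loops (a brace-counting function-body loop or a plain-run loop) and emits the joined section directly.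
import Mathlib
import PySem

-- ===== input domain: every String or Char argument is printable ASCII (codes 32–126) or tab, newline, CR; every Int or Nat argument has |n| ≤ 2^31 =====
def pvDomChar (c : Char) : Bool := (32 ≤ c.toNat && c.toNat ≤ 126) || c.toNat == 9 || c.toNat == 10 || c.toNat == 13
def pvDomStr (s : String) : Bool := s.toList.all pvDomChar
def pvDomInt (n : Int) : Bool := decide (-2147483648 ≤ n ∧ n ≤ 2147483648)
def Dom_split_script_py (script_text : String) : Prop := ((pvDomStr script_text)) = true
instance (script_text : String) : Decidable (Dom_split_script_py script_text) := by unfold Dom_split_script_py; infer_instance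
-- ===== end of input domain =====

-- B replaces A's single scan carrying in_function/brace_count state with an outer loop over a
-- line index and two inner consuming loops (one per section kind); objective: alternative decomposition, same cost.

-- ===== PORT A =====

-- line.strip().startswith('function ')
def pvIsFnStart (line : String) : Bool :=
  PySem.Str.startswith (PySem.Str.strip line) "function "

-- script_text.split('\n'); the separator is the nonempty literal '\n', so split? is always some
def pvLines (script_text : String) : List String :=
  (PySem.Str.split? script_text "\n").getD []

-- loop body; state: (sections, current_section, in_function, brace_count)
def pvStepA (st : List (String × Bool) × List String × Bool × Int) (line : String) :
    List (String × Bool) × List String × Bool × Int :=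
  match st with
  | (secs, cur, inFn, brace) =>
    if pvIsFnStart line then
      ((if cur.isEmpty then secs else secs ++ [(PySem.Str.join "\n" cur, inFn)]), [line], true, 0)
    else if inFn then
      let brace' := brace + (PySem.Str.count line "{" : Int) - (PySem.Str.count line "}" : Int)
      let cur' := cur ++ [line]
      if brace' = 0 ∧ PySem.Str.strip line = "}" then
        (secs ++ [(PySem.Str.join "\n" cur', true)], [], false, brace')
      else (secs, cur', true, brace')
    else (secs, cur ++ [line], false, brace)

-- the trailing 'if current_section: sections.append(...)'
def pvFinA (st : List (String × Bool) × List String × Bool × Int) : List (String × Bool) :=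
  match st with
  | (secs, cur, inFn, _) =>
    if cur.isEmpty then secs else secs ++ [(PySem.Str.join "\n" cur, inFn)]

def split_script_py (script_text : String) : List (String × Bool) :=
  pvFinA ((pvLines script_text).foldl pvStepA ([], [], false, 0))

-- ===== PORT B =====

-- inner loop of the non-function branch: consume lines until EOF or a function start
def pvRunLoop (lines : List String) (block : List String) : List String × List String :=
  match lines with
  | [] => (block, [])
  | l :: rest =>
    if pvIsFnStart l then (block, l :: rest) else pvRunLoop rest (block ++ [l])

-- inner loop of the function branch: count braces, stop after the closing '}' or before a new function
def pvFnLoop (lines : List String) (block : List String) (brace : Int) : List String × List String :=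
  match lines with
  | [] => (block, [])
  | l :: rest =>
    if pvIsFnStart l then (block, l :: rest)
    else
      let brace' := brace + (PySem.Str.count l "{" : Int) - (PySem.Str.count l "}" : Int)
      let block' := block ++ [l]
      if brace' = 0 ∧ PySem.Str.strip l = "}" then (block', rest)
      else pvFnLoop rest block' brace'

-- termination facts for the outer loop (cited in decreasing_by)
theorem pvRunLoop_snd_len (lines block : List String) :
    (pvRunLoop lines block).2.length ≤ lines.length := by
  induction lines generalizing block with
  | nil => simp [pvRunLoop]
  | cons l rest ih =>
    simp only [pvRunLoop]
    split
    · simp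
    · exact le_trans (ih _) (Nat.le_succ _)

theorem pvFnLoop_snd_len (lines block : List String) (brace : Int) :
    (pvFnLoop lines block brace).2.length ≤ lines.length := by
  induction lines generalizing block brace with
  | nil => simp [pvFnLoop]
  | cons l rest ih =>
    simp only [pvFnLoop]
    split
    · simp
    · split
      · simp
      · exact le_trans (ih _ _) (Nat.le_succ _)

-- outer 'while i < n' loop
def pvGoB (lines : List String) : List (String × Bool) :=
  match lines with
  | [] => []
  | l :: rest =>
    if pvIsFnStart l then
      let p := pvFnLoop rest [l] 0
      (PySem.Str.join "\n" p.1, true) :: pvGoB p.2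
    else
      let p := pvRunLoop rest [l]
      (PySem.Str.join "\n" p.1, false) :: pvGoB p.2
termination_by lines.length
decreasing_by
  · exact Nat.lt_succ_of_le (pvFnLoop_snd_len rest [l] 0)
  · exact Nat.lt_succ_of_le (pvRunLoop_snd_len rest [l])

def split_script_py_alt (script_text : String) : List (String × Bool) :=
  pvGoB (pvLines script_text)

-- ===== PRECONDITION & SPEC =====
def Spec_split_script_py (script_text : String) (out : List (String × Bool)) : Prop := out = split_script_py_alt script_text
instance (script_text : String) (out : List (String × Bool)) : Decidable (Spec_split_script_py script_text out) := by unfold Spec_split_script_py; infer_instance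

-- ===== CLAIM (what is proved, stated in full; the proofs are below) =====
def Claim_equal_split_script_py : Prop := ∀ (script_text : String), Dom_split_script_py script_text → Spec_split_script_py script_text (split_script_py script_text)

-- ===== LEMMAS AND PROOFS =====

-- accumulator lemma: pvRunLoop only appends to its block
theorem pvRunLoop_acc (lines a b : List String) :
    pvRunLoop lines (a ++ b) = (a ++ (pvRunLoop lines b).1, (pvRunLoop lines b).2) := by
  induction lines generalizing b with
  | nil => simp [pvRunLoop]
  | cons l rest ih =>
    simp only [pvRunLoop]
    split
    · simp
    · rw [List.append_assoc, ih]

-- goB's run branch, read off from an empty accumulator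
theorem pvGoB_run (lines : List String) :
    (if (pvRunLoop lines []).1.isEmpty then [] else
      [(PySem.Str.join "\n" (pvRunLoop lines []).1, false)]) ++ pvGoB (pvRunLoop lines []).2
    = pvGoB lines := by
  cases lines with
  | nil => simp [pvRunLoop, pvGoB]
  | cons l rest =>
    by_cases h : pvIsFnStart l = true
    · simp [pvRunLoop, h]
    · have hrl : pvRunLoop (l :: rest) [] = pvRunLoop rest [l] := by
        simp [pvRunLoop, h]
      have hacc := pvRunLoop_acc rest [l] []
      simp only [List.append_nil] at hacc
      rw [hrl,
        show pvGoB (l :: rest) = (PySem.Str.join "\n" (pvRunLoop rest [l]).1, false) ::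
          pvGoB (pvRunLoop rest [l]).2 from by rw [pvGoB]; simp [h],
        hacc]
      simp

-- main invariant: resuming A's fold from either carried state equals B's two inner loops
theorem pvMain (n : Nat) : ∀ lines : List String, lines.length ≤ n →
    (∀ (secs : List (String × Bool)) (cur : List String) (brace : Int),
      pvFinA (lines.foldl pvStepA (secs, cur, false, brace)) =
        secs ++ ((if (pvRunLoop lines cur).1.isEmpty then [] else
          [(PySem.Str.join "\n" (pvRunLoop lines cur).1, false)]) ++ pvGoB (pvRunLoop lines cur).2))
    ∧ (∀ (secs : List (String × Bool)) (cur : List String) (brace : Int), cur ≠ [] →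
      pvFinA (lines.foldl pvStepA (secs, cur, true, brace)) =
        secs ++ ((PySem.Str.join "\n" (pvFnLoop lines cur brace).1, true) ::
          pvGoB (pvFnLoop lines cur brace).2)) := by
  induction n with
  | zero =>
    intro lines hlen
    have hnil : lines = [] := List.length_eq_zero_iff.mp (Nat.le_zero.mp hlen)
    subst hnil
    constructor
    · intro secs cur brace
      cases cur <;> simp [pvFinA, pvRunLoop, pvGoB]
    · intro secs cur brace hcur
      simp [pvFinA, pvFnLoop, pvGoB, hcur]
  | succ n ih =>
    intro lines hlen
    cases lines with
    | nil =>
      constructor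
      · intro secs cur brace
        cases cur <;> simp [pvFinA, pvRunLoop, pvGoB]
      · intro secs cur brace hcur
        simp [pvFinA, pvFnLoop, pvGoB, hcur]
    | cons l rest =>
      have hrest : rest.length ≤ n := Nat.le_of_succ_le_succ hlen
      constructor
      · intro secs cur brace
        by_cases h : pvIsFnStart l = true
        · -- function starts: A flushes cur (if nonempty) and resumes in-function on rest
          have hstep : pvStepA (secs, cur, false, brace) l =
              ((if cur.isEmpty then secs else secs ++ [(PySem.Str.join "\n" cur, false)]),
                [l], true, 0) := by simp [pvStepA, h]
          rw [List.foldl_cons, hstep, (ih rest hrest).2 _ [l] 0 (by simp),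
            show pvRunLoop (l :: rest) cur = (cur, l :: rest) from by simp [pvRunLoop, h],
            show pvGoB (l :: rest) = (PySem.Str.join "\n" (pvFnLoop rest [l] 0).1, true) ::
              pvGoB (pvFnLoop rest [l] 0).2 from by rw [pvGoB]; simp [h]]
          cases cur <;> simp
        · -- plain line: A appends to cur, B's run loop consumes it
          have hstep : pvStepA (secs, cur, false, brace) l = (secs, cur ++ [l], false, brace) := by
            simp [pvStepA, h]
          rw [List.foldl_cons, hstep, (ih rest hrest).1 secs (cur ++ [l]) brace,
            show pvRunLoop (l :: rest) cur = pvRunLoop rest (cur ++ [l]) from by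
              simp [pvRunLoop, h]]
      · intro secs cur brace hcur
        have hce : cur.isEmpty = false := by simpa using hcur
        by_cases h : pvIsFnStart l = true
        · -- a new function interrupts the open one: flush cur as True, restart on [l]
          have hstep : pvStepA (secs, cur, true, brace) l =
              (secs ++ [(PySem.Str.join "\n" cur, true)], [l], true, 0) := by
            simp [pvStepA, h, hce]
          rw [List.foldl_cons, hstep, (ih rest hrest).2 _ [l] 0 (by simp),
            show pvFnLoop (l :: rest) cur brace = (cur, l :: rest) from by simp [pvFnLoop, h],
            show pvGoB (l :: rest) = (PySem.Str.join "\n" (pvFnLoop rest [l] 0).1, true) ::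
              pvGoB (pvFnLoop rest [l] 0).2 from by rw [pvGoB]; simp [h]]
          simp
        · by_cases hc : brace + (PySem.Chars.count l.toList ['{'] : Int)
              - (PySem.Chars.count l.toList ['}'] : Int) = 0 ∧ PySem.Str.strip l = "}"
          · -- the function closes on this line
            have hstep : pvStepA (secs, cur, true, brace) l =
                (secs ++ [(PySem.Str.join "\n" (cur ++ [l]), true)], [], false,
                  brace + (PySem.Chars.count l.toList ['{'] : Int)
                    - (PySem.Chars.count l.toList ['}'] : Int)) := by
              simp [pvStepA, h, hc]
            rw [List.foldl_cons, hstep, (ih rest hrest).1 _ [] _,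
              show pvFnLoop (l :: rest) cur brace = (cur ++ [l], rest) from by
                simp [pvFnLoop, h, hc],
              pvGoB_run rest]
            simp
          · -- still inside: count braces and keep going
            have hstep : pvStepA (secs, cur, true, brace) l = (secs, cur ++ [l], true,
                brace + (PySem.Chars.count l.toList ['{'] : Int)
                  - (PySem.Chars.count l.toList ['}'] : Int)) := by
              simp [pvStepA, h, hc]
            rw [List.foldl_cons, hstep, (ih rest hrest).2 secs (cur ++ [l]) _ (by simp),
              show pvFnLoop (l :: rest) cur brace = pvFnLoop rest (cur ++ [l])
                  (brace + (PySem.Chars.count l.toList ['{'] : Int)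
                    - (PySem.Chars.count l.toList ['}'] : Int)) from by
                simp [pvFnLoop, h, hc]]

-- ===== VERDICT (by name: the statement is the Claim_ definition above) =====
theorem split_script_py_spec : Claim_equal_split_script_py := by
  intro s _
  unfold Spec_split_script_py split_script_py split_script_py_alt
  rw [(pvMain (pvLines s).length (pvLines s) le_rfl).1 [] [] 0, pvGoB_run]
  simp
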